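-- pv_equiv track=rewrite | github.com/FilippoPetroli/vigenere_cipher_solver | viginere_cypher.py | substrings_by_position
-- ===== SOURCE A (Python) =====
-- def substrings_by_position(split_text):
--     new_list = []
--     for sublist in split_text:
--         for j, item in enumerate(sublist):
--             if len(new_list) <= j:
--                 new_list.append([item])
--             else:
--                 new_list[j].append(item)
--     return new_list
-- ===== SOURCE B (Python) =====
-- def substrings_by_position(split_text):
--     maxlen = max((len(s) for s in split_text), default=0)
--     result = []
--     for j in range(maxlen):
--         row = []
--         for sublist in split_text:
--             if j < len(sublist):
--                 row.append(sublist[j])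
--         result.append(row)
--     return result
-- ===== Notes on version B (the rewrite author's own statement) =====
-- stated objective: alternative
-- what changed: B flips the outer axis: it precomputes the maximum sublist length and builds each output row j in one pass over all sublists (guarded j < len), instead of A's incremental grow-or-extend of rows while scanning each sublist.
import Mathlib
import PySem

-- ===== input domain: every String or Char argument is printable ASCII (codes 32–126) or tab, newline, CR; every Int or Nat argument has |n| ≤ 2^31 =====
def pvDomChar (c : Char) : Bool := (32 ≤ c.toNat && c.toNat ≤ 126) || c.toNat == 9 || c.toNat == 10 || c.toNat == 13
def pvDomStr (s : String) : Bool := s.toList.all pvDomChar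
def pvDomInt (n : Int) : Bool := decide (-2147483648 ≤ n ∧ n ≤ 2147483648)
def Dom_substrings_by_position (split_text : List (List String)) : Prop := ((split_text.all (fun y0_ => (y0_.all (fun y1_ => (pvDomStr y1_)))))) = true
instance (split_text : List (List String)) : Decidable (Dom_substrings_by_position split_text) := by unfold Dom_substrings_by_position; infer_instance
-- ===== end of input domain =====

-- B builds each output row by position (with a max-length pre-pass) instead of A's
-- grow-or-extend accumulation of rows while scanning each sublist; alternative decomposition, not faster.

-- ===== PORT A =====
-- inner loop of A: for j, item in enumerate(sublist): append-new-row or extend row j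
def pvFillRows (new_list : List (List String)) (j : Nat) : List String → List (List String)
  | [] => new_list
  | item :: rest =>
      if new_list.length ≤ j then
        pvFillRows (new_list ++ [[item]]) (j + 1) rest
      else
        pvFillRows (new_list.set j (new_list.getD j [] ++ [item])) (j + 1) rest

def substrings_by_position (split_text : List (List String)) : List (List String) :=
  split_text.foldl (fun new_list sublist => pvFillRows new_list 0 sublist) []

-- ===== PORT B =====
def substrings_by_position_alt (split_text : List (List String)) : List (List String) :=
  let maxlen := (split_text.map List.length).foldl Nat.max 0
  (List.range maxlen).map (fun j =>
    split_text.foldl (fun row sublist =>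
      if j < sublist.length then row ++ [sublist.getD j ""] else row) [])

-- ===== PRECONDITION & SPEC =====
def Spec_substrings_by_position (split_text : List (List String)) (out : List (List String)) : Prop := out = substrings_by_position_alt split_text
instance (split_text : List (List String)) (out : List (List String)) : Decidable (Spec_substrings_by_position split_text out) := by unfold Spec_substrings_by_position; infer_instance

-- ===== CLAIM (what is proved, stated in full; the proofs are below) =====
def Claim_equal_substrings_by_position : Prop := ∀ (split_text : List (List String)), Dom_substrings_by_position split_text → Spec_substrings_by_position split_text (substrings_by_position split_text)

-- ===== LEMMAS AND PROOFS =====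

-- structural characterization of A's inner loop: column-wise zip of rows with a sublist
def pvZipCols : List (List String) → List String → List (List String)
  | nl, [] => nl
  | [], x :: xs => [x] :: pvZipCols [] xs
  | r :: nl, x :: xs => (r ++ [x]) :: pvZipCols nl xs

-- B's inner fold, as a function of the processed prefix
def pvColA (L : List (List String)) (j : Nat) : List String :=
  L.foldl (fun row s => if j < s.length then row ++ [s.getD j ""] else row) []

def pvMaxLen (L : List (List String)) : Nat := (L.map List.length).foldl Nat.max 0

theorem pvFillRows_eq (s : List String) : ∀ (nl : List (List String)) (j : Nat),
    j ≤ nl.length → pvFillRows nl j s = nl.take j ++ pvZipCols (nl.drop j) s := by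
  induction s with
  | nil => intro nl j h; simp [pvFillRows, pvZipCols]
  | cons x xs ih =>
    intro nl j h
    by_cases hj : nl.length ≤ j
    · have hje : j = nl.length := le_antisymm h hj
      rw [pvFillRows, if_pos hj, ih (nl ++ [[x]]) (j + 1) (by simp [hje])]
      subst hje
      simp only [List.take_append, List.drop_append]
      rw [List.take_of_length_le (by omega), List.drop_eq_nil_of_le (by omega)]
      simp [pvZipCols]
    · push Not at hj
      rw [pvFillRows, if_neg (by omega),
        ih (nl.set j (nl.getD j [] ++ [x])) (j + 1) (by simp; omega)]
      have hset : nl.set j (nl.getD j [] ++ [x])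
          = nl.take j ++ (nl.getD j [] ++ [x]) :: nl.drop (j + 1) := by
        rw [List.set_eq_take_append_cons_drop, if_pos hj]
      have hdrop : nl.drop j = nl[j] :: nl.drop (j + 1) := List.drop_eq_getElem_cons hj
      have hgd : nl.getD j [] = nl[j] := by
        simp [List.getD_eq_getElem?_getD, List.getElem?_eq_getElem hj]
      have hlt : (List.take j nl).length = j := by simp; omega
      have hmin : min (j + 1) j = j := by omega
      have hone : j + 1 - j = 1 := by omega
      have h2 : (nl.set j (nl.getD j [] ++ [x])).drop (j + 1) = nl.drop (j + 1) := by
        rw [hset, List.drop_append, hlt, List.drop_eq_nil_of_le (by omega), hone]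
        simp
      have h1 : (nl.set j (nl.getD j [] ++ [x])).take (j + 1)
          = nl.take j ++ [nl.getD j [] ++ [x]] := by
        rw [hset, List.take_append, hlt, List.take_take, hmin, hone]
        simp
      rw [h1, h2, hdrop, hgd, pvZipCols]
      simp

theorem pvZipCols_eq (s : List String) : ∀ (nl : List (List String)),
    pvZipCols nl s = (List.range (max nl.length s.length)).map
      (fun i => nl.getD i [] ++ if i < s.length then [s.getD i ""] else []) := by
  induction s with
  | nil =>
    intro nl
    show nl = _
    refine List.ext_getElem (by simp) ?_
    intro i h1 h2
    simp [List.getD_eq_getElem?_getD, List.getElem?_eq_getElem h1]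
  | cons x xs ih =>
    intro nl
    match nl with
    | [] =>
      rw [pvZipCols, ih []]
      simp only [List.length_nil, Nat.max_eq_right (Nat.zero_le _), List.length_cons,
        List.range_succ_eq_map, List.map_cons, List.map_map]
      congr 1
      apply List.map_congr_left
      intro i _; simp
    | r :: nl' =>
      rw [pvZipCols, ih nl']
      simp only [List.length_cons, Nat.succ_max_succ, List.range_succ_eq_map,
        List.map_cons, List.map_map]
      congr 1
      apply List.map_congr_left
      intro i _; simp

theorem pvLe_foldl_max : ∀ (l : List Nat) (b : Nat), b ≤ l.foldl Nat.max b := by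
  intro l
  induction l with
  | nil => intro b; exact le_refl b
  | cons y ys ih => intro b; exact le_trans (Nat.le_max_left b y) (ih (Nat.max b y))

theorem pvMem_le_foldl_max (l : List Nat) : ∀ (b a : Nat), a ∈ l → a ≤ l.foldl Nat.max b := by
  induction l with
  | nil => intro b a h; cases h
  | cons x xs ih =>
    intro b a h
    rcases List.mem_cons.mp h with h | h
    · subst h
      exact le_trans (Nat.le_max_right b a) (pvLe_foldl_max xs (Nat.max b a))
    · exact ih _ _ h

theorem pvColA_nil_of_all (j : Nat) : ∀ (L : List (List String)), (∀ s ∈ L, s.length ≤ j) →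
    pvColA L j = [] := by
  intro L
  unfold pvColA
  induction L with
  | nil => intro _; rfl
  | cons s rest ih =>
    intro hall
    have hs : ¬ j < s.length := by
      have := hall s (List.mem_cons_self); omega
    simp only [List.foldl_cons, if_neg hs]
    exact ih (fun t ht => hall t (List.mem_cons_of_mem _ ht))

theorem pvColA_nil_of_ge (L : List (List String)) (j : Nat) (h : pvMaxLen L ≤ j) :
    pvColA L j = [] :=
  pvColA_nil_of_all j L (fun s hs =>
    le_trans (pvMem_le_foldl_max (L.map List.length) 0 s.length (List.mem_map_of_mem hs)) h)

theorem pvColA_append (L : List (List String)) (s : List String) (j : Nat) :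
    pvColA (L ++ [s]) j = pvColA L j ++ if j < s.length then [s.getD j ""] else [] := by
  unfold pvColA
  rw [List.foldl_append]
  simp only [List.foldl_cons, List.foldl_nil]
  split
  · rfl
  · simp

theorem pvMaxLen_append (L : List (List String)) (s : List String) :
    pvMaxLen (L ++ [s]) = Nat.max (pvMaxLen L) s.length := by
  unfold pvMaxLen
  simp [List.foldl_append]

theorem pvMain (L : List (List String)) :
    L.foldl (fun nl s => pvFillRows nl 0 s) []
      = (List.range (pvMaxLen L)).map (fun j => pvColA L j) := by
  induction L using List.reverseRecOn with
  | nil => simp [pvMaxLen, pvColA]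
  | append_singleton L s ih =>
    rw [List.foldl_append]
    simp only [List.foldl_cons, List.foldl_nil]
    rw [ih, pvFillRows_eq s _ 0 (Nat.zero_le _)]
    simp only [List.take_zero, List.drop_zero, List.nil_append]
    rw [pvZipCols_eq, pvMaxLen_append]
    simp only [List.length_map, List.length_range]
    apply List.map_congr_left
    intro i hi
    rw [pvColA_append]
    congr 1
    by_cases him : i < pvMaxLen L
    · simp [List.getD_eq_getElem?_getD, him]
    · push Not at him
      rw [pvColA_nil_of_ge L i him]
      have hn : (List.range (pvMaxLen L))[i]? = none :=
        List.getElem?_eq_none (by simpa using him)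
      simp [List.getD_eq_getElem?_getD, hn]

-- ===== VERDICT (by name: the statement is the Claim_ definition above) =====
theorem substrings_by_position_spec : Claim_equal_substrings_by_position := by
  intro split_text _
  unfold Spec_substrings_by_position substrings_by_position substrings_by_position_alt
  rw [pvMain]
  rfl
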